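-- pv_equiv track=rewrite | github.com/raeperd/advent-of-code | 03/sol.py | index_of_max_with_suffix
-- ===== SOURCE A (Python) =====
-- def index_of_max_with_suffix(numbers: str, num_suffix: int) -> int:
--     result = 0
--     max_number = 0
--     for i in range(len(numbers) - num_suffix):
--         if int(numbers[i]) > max_number:
--             result = i
--             max_number = int(numbers[i])
--     return result
-- ===== SOURCE B (Python) =====
-- def index_of_max_with_suffix(numbers: str, num_suffix: int) -> int:
--     vals = [int(numbers[i]) for i in range(len(numbers) - num_suffix)]
--     if not vals:
--         return 0
--     return vals.index(max(vals))
-- ===== Notes on version B (the rewrite author's own statement) =====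
-- stated objective: alternative
-- what changed: Replaces A's single running-max-with-index scan (two mutable variables updated under a strict '>' test) by materializing the list of digit values, then taking max() and finding its first position with list.index().
import Mathlib
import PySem

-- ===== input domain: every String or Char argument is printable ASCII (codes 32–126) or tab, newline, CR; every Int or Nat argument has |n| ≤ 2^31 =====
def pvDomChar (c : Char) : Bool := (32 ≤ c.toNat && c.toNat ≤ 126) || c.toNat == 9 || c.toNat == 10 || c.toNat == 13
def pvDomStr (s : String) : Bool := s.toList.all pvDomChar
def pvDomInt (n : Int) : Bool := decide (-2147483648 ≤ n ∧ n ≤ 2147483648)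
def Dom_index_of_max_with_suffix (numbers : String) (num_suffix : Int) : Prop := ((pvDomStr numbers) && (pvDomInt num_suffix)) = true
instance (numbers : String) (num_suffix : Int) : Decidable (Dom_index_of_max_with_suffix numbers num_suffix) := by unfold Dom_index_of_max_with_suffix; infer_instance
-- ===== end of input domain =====

-- B replaces A's single running-max-and-index scan with materialize-the-values, take max(), then list.index();
-- same O(n) cost, a different decomposition (objective: alternative).

-- ===== PORT A =====
-- A's loop 'for i in range(len(numbers) - num_suffix)' with state (result, max_number);
-- int(numbers[i]) is ported as Str.pyGet? + Int.ofChars? (none = IndexError/ValueError, excluded by Pre_; .getD 0 only totalizes).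
def index_of_max_with_suffix (numbers : String) (num_suffix : Int) : Int :=
  ((PySem.List.pyRange 0 (PySem.Str.len numbers - num_suffix) 1).foldl
    (fun (st : Int × Int) i =>
      let d := ((PySem.Str.pyGet? numbers i).bind (fun c => PySem.Int.ofChars? [c])).getD 0
      if d > st.2 then (i, d) else st) ((0 : Int), (0 : Int))).1

-- ===== PORT B =====
-- Source B: vals = [int(numbers[i]) for i in range(len(numbers) - num_suffix)]; if not vals: return 0; return vals.index(max(vals))
def index_of_max_with_suffix_alt (numbers : String) (num_suffix : Int) : Int :=
  let vals := (PySem.List.pyRange 0 (PySem.Str.len numbers - num_suffix) 1).map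
    (fun i => ((PySem.Str.pyGet? numbers i).bind (fun c => PySem.Int.ofChars? [c])).getD 0)
  if vals = [] then 0
  else
    match PySem.List.max? vals (fun x => x) with
    | some m => ((PySem.List.index? vals m).getD 0 : Nat)
    | none => 0

-- ===== PRECONDITION & SPEC =====
-- Pre_ excludes exactly the inputs where the Python raises: negative num_suffix (IndexError past the end)
-- and a non-digit character in the scanned prefix (ValueError from int()); B raises identically there.
def Pre_index_of_max_with_suffix (numbers : String) (num_suffix : Int) : Prop :=
  0 ≤ num_suffix ∧
    (numbers.toList.take (numbers.toList.length - num_suffix.toNat)).all PySem.Chars.isdigit = true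
instance (numbers : String) (num_suffix : Int) : Decidable (Pre_index_of_max_with_suffix numbers num_suffix) := by
  unfold Pre_index_of_max_with_suffix; infer_instance
def pvWitness_index_of_max_with_suffix : String × Int := ("2913", 1)

def Spec_index_of_max_with_suffix (numbers : String) (num_suffix : Int) (out : Int) : Prop := out = index_of_max_with_suffix_alt numbers num_suffix
instance (numbers : String) (num_suffix : Int) (out : Int) : Decidable (Spec_index_of_max_with_suffix numbers num_suffix out) := by unfold Spec_index_of_max_with_suffix; infer_instance

-- ===== CLAIM (what is proved, stated in full; the proofs are below) =====
def Claim_equal_index_of_max_with_suffix : Prop := ∀ (numbers : String) (num_suffix : Int), Dom_index_of_max_with_suffix numbers num_suffix → Pre_index_of_max_with_suffix numbers num_suffix → Spec_index_of_max_with_suffix numbers num_suffix (index_of_max_with_suffix numbers num_suffix)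

-- ===== LEMMAS AND PROOFS =====

-- digit value of a character
def dv (c : Char) : Int := (c.toNat : Int) - 48

-- A's loop as structural recursion on the list of scanned values (i = current index)
def loopA : List Int → Nat → Int × Int → Int × Int
  | [], _, st => st
  | d :: ds, i, st => loopA ds (i + 1) (if d > st.2 then ((i : Int), d) else st)

theorem digit_cases (c : Char) (h : PySem.Chars.isdigit c = true) :
    c = '0' ∨ c = '1' ∨ c = '2' ∨ c = '3' ∨ c = '4' ∨ c = '5' ∨ c = '6' ∨ c = '7' ∨ c = '8' ∨ c = '9' := by
  simp [PySem.Chars.isdigit, Char.le_def] at h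
  obtain ⟨h1, h2⟩ := h
  have h1' : (48 : UInt32).toNat ≤ c.val.toNat := UInt32.le_iff_toNat_le.mp h1
  have h2' : c.val.toNat ≤ (57 : UInt32).toNat := UInt32.le_iff_toNat_le.mp h2
  have e48 : (48 : UInt32).toNat = 48 := by decide
  have e57 : (57 : UInt32).toNat = 57 := by decide
  have hn : c.val.toNat = 48 ∨ c.val.toNat = 49 ∨ c.val.toNat = 50 ∨ c.val.toNat = 51 ∨ c.val.toNat = 52 ∨ c.val.toNat = 53 ∨ c.val.toNat = 54 ∨ c.val.toNat = 55 ∨ c.val.toNat = 56 ∨ c.val.toNat = 57 := by omega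
  have conv : ∀ (d : Char), c.val.toNat = d.val.toNat → c = d := by
    intro d hd; exact Char.ext (UInt32.toNat_inj.mp hd)
  rcases hn with h|h|h|h|h|h|h|h|h|h
  · exact Or.inl (conv '0' (by rw [h]; decide))
  · exact Or.inr (Or.inl (conv '1' (by rw [h]; decide)))
  · exact Or.inr (Or.inr (Or.inl (conv '2' (by rw [h]; decide))))
  · exact Or.inr (Or.inr (Or.inr (Or.inl (conv '3' (by rw [h]; decide)))))
  · exact Or.inr (Or.inr (Or.inr (Or.inr (Or.inl (conv '4' (by rw [h]; decide))))))
  · exact Or.inr (Or.inr (Or.inr (Or.inr (Or.inr (Or.inl (conv '5' (by rw [h]; decide)))))))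
  · exact Or.inr (Or.inr (Or.inr (Or.inr (Or.inr (Or.inr (Or.inl (conv '6' (by rw [h]; decide))))))))
  · exact Or.inr (Or.inr (Or.inr (Or.inr (Or.inr (Or.inr (Or.inr (Or.inl (conv '7' (by rw [h]; decide)))))))))
  · exact Or.inr (Or.inr (Or.inr (Or.inr (Or.inr (Or.inr (Or.inr (Or.inr (Or.inl (conv '8' (by rw [h]; decide))))))))))
  · exact Or.inr (Or.inr (Or.inr (Or.inr (Or.inr (Or.inr (Or.inr (Or.inr (Or.inr (conv '9' (by rw [h]; decide))))))))))

theorem ofChars_digit (c : Char) (h : PySem.Chars.isdigit c = true) :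
    PySem.Int.ofChars? [c] = some (dv c) := by
  rcases digit_cases c h with h|h|h|h|h|h|h|h|h|h <;> subst h <;> decide

theorem dv_nonneg (c : Char) (h : PySem.Chars.isdigit c = true) : 0 ≤ dv c := by
  rcases digit_cases c h with h|h|h|h|h|h|h|h|h|h <;> subst h <;> decide

theorem foldl_max_init_le : ∀ (t : List Int) (m : Int), m ≤ t.foldl max m := by
  intro t
  induction t with
  | nil => intro m; simp
  | cons d t ih =>
    intro m
    exact le_trans (le_max_left m d) (ih (max m d))

theorem mem_le_foldl_max : ∀ (t : List Int) (m : Int), ∀ e ∈ t, e ≤ t.foldl max m := by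
  intro t
  induction t with
  | nil => simp
  | cons d t ih =>
    intro m e he
    rcases List.mem_cons.mp he with h | h
    · subst h
      exact le_trans (le_max_right m e) (foldl_max_init_le t (max m e))
    · exact ih (max m d) e h

theorem foldl_max_mem : ∀ (t : List Int) (m : Int), t.foldl max m = m ∨ t.foldl max m ∈ t := by
  intro t
  induction t with
  | nil => intro m; left; rfl
  | cons d t ih =>
    intro m
    rcases ih (max m d) with h | h
    · simp only [List.foldl_cons, h]
      rcases max_choice m d with h2 | h2
      · left; exact h2
      · right; rw [h2]; exact List.mem_cons_self
    · right; exact List.mem_cons_of_mem d h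

theorem foldl_max_of_le (t : List Int) (m : Int) (h : ∀ e ∈ t, e ≤ m) : t.foldl max m = m := by
  induction t with
  | nil => rfl
  | cons d tl ih =>
    simp only [List.foldl_cons]
    rw [max_eq_left (h d List.mem_cons_self)]
    exact ih (fun e he => h e (List.mem_cons_of_mem d he))

theorem loopA_le (ds : List Int) : ∀ (i : Nat) (r m : Int), (∀ d ∈ ds, d ≤ m) → loopA ds i (r, m) = (r, m) := by
  induction ds with
  | nil => intro i r m _; rfl
  | cons d t ih =>
    intro i r m h
    have hd : ¬ d > m := not_lt.mpr (h d List.mem_cons_self)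
    simp only [loopA, if_neg hd]
    exact ih (i + 1) r m (fun e he => h e (List.mem_cons_of_mem d he))

theorem loopA_gt (ds : List Int) : ∀ (i : Nat) (r m : Int), (∃ d ∈ ds, m < d) →
    loopA ds i (r, m) = (((i + (PySem.List.index? ds (ds.foldl max m)).getD 0 : Nat) : Int), ds.foldl max m) := by
  induction ds with
  | nil => intro i r m h; simp at h
  | cons d t ih =>
    intro i r m hex
    have hM : (d :: t).foldl max m = t.foldl max (max m d) := rfl
    by_cases hd : m < d
    · simp only [loopA, if_pos (by exact hd : d > m)]
      rw [hM, max_eq_right (le_of_lt hd)]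
      by_cases h2 : ∃ e ∈ t, d < e
      · rw [ih (i + 1) (i : Int) d h2]
        obtain ⟨e, he, hde⟩ := h2
        have hMt : d < t.foldl max d := lt_of_lt_of_le hde (mem_le_foldl_max t d e he)
        have hne : d ≠ t.foldl max d := ne_of_lt hMt
        have hmem : t.foldl max d ∈ t := by
          rcases foldl_max_mem t d with h | h
          · exfalso; omega
          · exact h
        rw [PySem.List.index?_cons_of_ne _ hne]
        obtain ⟨j, hj⟩ := Option.isSome_iff_exists.mp ((PySem.List.index?_isSome_iff _ _).mpr hmem)
        rw [hj]
        simp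
        ring
      · push Not at h2
        rw [loopA_le t (i + 1) (i : Int) d h2]
        rw [foldl_max_of_le t d h2]
        rw [PySem.List.index?_cons_self]
        simp
    · have hdm : d ≤ m := not_lt.mp hd
      simp only [loopA, if_neg hd]
      rw [hM, max_eq_left hdm]
      have h2 : ∃ e ∈ t, m < e := by
        obtain ⟨e, he, hme⟩ := hex
        rcases List.mem_cons.mp he with h | h
        · exact absurd (h ▸ hme) (not_lt.mpr hdm)
        · exact ⟨e, h, hme⟩
      rw [ih (i + 1) r m h2]
      obtain ⟨e, he, hme⟩ := h2
      have hMt : m < t.foldl max m := lt_of_lt_of_le hme (mem_le_foldl_max t m e he)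
      have hne : d ≠ t.foldl max m := ne_of_lt (lt_of_le_of_lt hdm hMt)
      have hmem : t.foldl max m ∈ t := by
        rcases foldl_max_mem t m with h | h
        · omega
        · exact h
      rw [PySem.List.index?_cons_of_ne _ hne]
      obtain ⟨j, hj⟩ := Option.isSome_iff_exists.mp ((PySem.List.index?_isSome_iff _ _).mpr hmem)
      rw [hj]
      simp
      ring

-- A's fold over a range of indices is loopA on the list of accessed values
theorem fold_range'_eq_loopA (g : Nat → Int) : ∀ (k s : Nat) (st : Int × Int),
    (List.range' s k).foldl (fun st j => if g j > st.2 then ((j : Int), g j) else st) st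
      = loopA ((List.range' s k).map g) s st := by
  intro k
  induction k with
  | zero => intro s st; rfl
  | succ k ih =>
    intro s st
    rw [List.range'_succ]
    simp only [List.foldl_cons, List.map_cons, loopA]
    exact ih (s + 1) _

-- the shared value list of both ports equals (take k).map dv
theorem range_map_body (numbers : String) (k : Nat)
    (hk : k ≤ numbers.toList.length)
    (hdig : ∀ c ∈ numbers.toList.take k, PySem.Chars.isdigit c = true) :
    (List.range k).map
        (fun j => ((PySem.Str.pyGet? numbers ((j : Nat) : Int)).bind (fun c => PySem.Int.ofChars? [c])).getD 0)
      = (numbers.toList.take k).map dv := by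
  apply List.ext_getElem
  · simp only [List.length_map, List.length_range, List.length_take]
    omega
  · intro j h1 h2
    simp only [List.getElem_map, List.getElem_range, List.getElem_take]
    have hjk : j < k := by
      simp only [List.length_map, List.length_range] at h1; omega
    have hj : j < numbers.toList.length := by omega
    have hmem : numbers.toList[j] ∈ numbers.toList.take k := by
      exact List.mem_take_iff_getElem.mpr ⟨j, by omega, by simp⟩
    rw [PySem.Str.pyGet?_natCast]
    rw [List.getElem?_eq_getElem hj]
    simp only [Option.bind_some]
    rw [ofChars_digit _ (hdig _ hmem)]
    rfl

-- the argmax loop equals "index of first max" on the same (nonnegative) value list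
theorem loopA_eq_index_max (vals : List Int) (hnn : ∀ v ∈ vals, 0 ≤ v) :
    (loopA vals 0 (0, 0)).1
      = (if vals = [] then (0 : Int)
         else match PySem.List.max? vals (fun x => x) with
           | some m => (((PySem.List.index? vals m).getD 0 : Nat) : Int)
           | none => 0) := by
  cases vals with
  | nil => rfl
  | cons v t =>
    rw [if_neg (by simp)]
    rw [PySem.List.max?_id_cons]
    by_cases hex : ∃ d ∈ v :: t, (0 : Int) < d
    · rw [loopA_gt (v :: t) 0 0 0 hex]
      have h0 : (v :: t).foldl max 0 = t.foldl max v := by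
        simp only [List.foldl_cons]
        rw [max_eq_right (hnn v List.mem_cons_self)]
      rw [h0]
      simp
    · push Not at hex
      have hall : ∀ d ∈ v :: t, d = 0 := fun d hd => le_antisymm (hex d hd) (hnn d hd)
      rw [loopA_le (v :: t) 0 0 0 (fun d hd => (hall d hd).le)]
      have hv : v = 0 := hall v List.mem_cons_self
      have hM : t.foldl max v = v := foldl_max_of_le t v (fun e he => by rw [hall e (List.mem_cons_of_mem v he), hv])
      rw [hM]
      have hidx : PySem.List.index? (v :: t) v = some 0 := PySem.List.index?_cons_self v t
      rw [PySem.List.index?_eq_idxOf?] at hidx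
      simp [hidx]

-- ===== VERDICT (by name: the statement is the Claim_ definition above) =====
theorem index_of_max_with_suffix_spec : Claim_equal_index_of_max_with_suffix := by
  intro numbers num_suffix _ hpre
  obtain ⟨hns, hdigB⟩ := hpre
  have hdig : ∀ c ∈ numbers.toList.take (numbers.toList.length - num_suffix.toNat),
      PySem.Chars.isdigit c = true := List.all_eq_true.mp hdigB
  unfold Spec_index_of_max_with_suffix
  unfold index_of_max_with_suffix index_of_max_with_suffix_alt
  have hlen : PySem.Str.len numbers = (numbers.toList.length : Int) := by
    simp [PySem.Str.len_eq]
  set b : Int := PySem.Str.len numbers - num_suffix with hb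
  have hbk : b.toNat = numbers.toList.length - num_suffix.toNat := by
    rw [hb, hlen]; omega
  have hk : b.toNat ≤ numbers.toList.length := by omega
  rw [PySem.List.pyRange_one 0 b]
  simp only [sub_zero, zero_add]
  have hdig' : ∀ c ∈ numbers.toList.take b.toNat, PySem.Chars.isdigit c = true := by
    rw [hbk]; exact hdig
  have hmap := range_map_body numbers b.toNat hk hdig'
  -- B side
  rw [List.foldl_map, List.map_map]
  have hcomp : ((fun i => ((PySem.Str.pyGet? numbers i).bind fun c => PySem.Int.ofChars? [c]).getD 0) ∘ fun k => ((k : Nat) : Int))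
      = (fun j : Nat => ((PySem.Str.pyGet? numbers ((j : Nat) : Int)).bind fun c => PySem.Int.ofChars? [c]).getD 0) := rfl
  rw [hcomp, hmap]
  -- A side: fold over range = loopA over the value list
  rw [List.range_eq_range']
  have hA := fold_range'_eq_loopA
      (fun j : Nat => ((PySem.Str.pyGet? numbers ((j : Nat) : Int)).bind fun c => PySem.Int.ofChars? [c]).getD 0)
      b.toNat 0 ((0 : Int), (0 : Int))
  rw [hA]
  rw [← List.range_eq_range', hmap]
  exact loopA_eq_index_max _ (by
    intro v hv
    simp only [List.mem_map] at hv
    obtain ⟨c, hc, rfl⟩ := hv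
    exact dv_nonneg c (hdig' c hc))
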